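-- pv_equiv track=rewrite | github.com/myydyn/learn-python | py practice/124-dict-ket[i].append(i).py | tao_dict
-- ===== SOURCE A (Python) =====
-- def tao_dict(s):
--     dictKq = {}
--     for i in s:
--         if i in dictKq:
--             dictKq[i].append(i)
--         else:
--             dictKq[i] = [i]
--     return dictKq
-- ===== SOURCE B (Python) =====
-- def tao_dict(s):
--     counts = {}
--     for c in s:
--         counts[c] = counts.get(c, 0) + 1
--     return {c: [c] * n for c, n in counts.items()}
-- ===== Notes on version B (the rewrite author's own statement) =====
-- stated objective: alternative
-- what changed: B tallies character counts in one pass and then expands each unique character to a repeated list in a second pass, instead of A's single incremental append-to-bucket loop.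
import Mathlib
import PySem

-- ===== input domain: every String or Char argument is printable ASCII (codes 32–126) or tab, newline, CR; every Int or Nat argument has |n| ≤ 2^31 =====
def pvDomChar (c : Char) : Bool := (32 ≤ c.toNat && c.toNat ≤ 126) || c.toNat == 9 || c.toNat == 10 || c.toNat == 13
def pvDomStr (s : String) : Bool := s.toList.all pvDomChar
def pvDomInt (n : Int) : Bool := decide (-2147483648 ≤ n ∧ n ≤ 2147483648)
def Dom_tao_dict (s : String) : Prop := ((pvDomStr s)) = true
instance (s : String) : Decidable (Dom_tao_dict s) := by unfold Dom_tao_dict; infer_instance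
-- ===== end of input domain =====

-- B replaces A's incremental append-to-bucket loop by a tally pass plus a replicate-expansion pass (alternative decomposition, same cost).

-- ===== PORT A =====
-- for i in s: if i in dictKq: dictKq[i].append(i) else: dictKq[i] = [i]
def tao_dict (s : String) : List (String × List String) :=
  ((s.toList.map (fun c => String.mk [c])).foldl
    (fun d i => if d.contains i then d.insert i (d.getD i [] ++ [i]) else d.insert i [i])
    PySem.Dict.empty).items

-- ===== PORT B =====
-- counts[c] = counts.get(c, 0) + 1; then {c: [c] * n for c, n in counts.items()}
-- [c] * n for an Int n ≥ 0 is List.replicate n.toNat [c-string]; counts are always ≥ 1, so exact.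
def tao_dict_alt (s : String) : List (String × List String) :=
  let counts : PySem.Dict String Int :=
    (s.toList.map (fun c => String.mk [c])).foldl
      (fun d c => d.insert c (d.getD c 0 + 1)) PySem.Dict.empty
  counts.items.map (fun p => (p.1, List.replicate p.2.toNat p.1))

-- ===== PRECONDITION & SPEC =====
def Spec_tao_dict (s : String) (out : List (String × List String)) : Prop := out = tao_dict_alt s
instance (s : String) (out : List (String × List String)) : Decidable (Spec_tao_dict s out) := by unfold Spec_tao_dict; infer_instance

-- ===== CLAIM (what is proved, stated in full; the proofs are below) =====
def Claim_equal_tao_dict : Prop := ∀ (s : String), Dom_tao_dict s → Spec_tao_dict s (tao_dict s)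

-- ===== LEMMAS AND PROOFS =====

-- A's branchy step is exactly Dict.modify with default []
theorem tao_step_eq_modify (d : PySem.Dict String (List String)) (i : String) :
    (if d.contains i then d.insert i (d.getD i [] ++ [i]) else d.insert i [i])
      = d.modify i [] (· ++ [i]) := by
  by_cases h : d.contains i = true
  · simp [h, PySem.Dict.modify]
  · simp only [Bool.not_eq_true] at h
    simp [h, PySem.Dict.modify, PySem.Dict.getD_of_not_contains d _ h]

-- A's dict over any string list l, characterised
theorem tao_fold_items (l : List String) :
    (l.foldl
      (fun d i => if d.contains i then d.insert i (d.getD i [] ++ [i]) else d.insert i [i])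
      PySem.Dict.empty).items
      = (PySem.Set.ofList l).map (fun k => (k, List.replicate (l.count k) k)) := by
  have hstep : (l.foldl
      (fun d i => if d.contains i then d.insert i (d.getD i [] ++ [i]) else d.insert i [i])
      PySem.Dict.empty)
      = l.foldl (fun d i => d.modify i [] (· ++ [i])) PySem.Dict.empty :=
    PySem.List.foldl_congr_mem l _ _ _ (fun acc x _ => tao_step_eq_modify acc x)
  rw [hstep]
  have hnd : (l.foldl (fun d i => d.modify i [] (· ++ [i])) PySem.Dict.empty).keys.Nodup :=
    PySem.Dict.nodup_keys_foldl_modify_key l id [] (fun _ x => (· ++ [x])) PySem.Dict.empty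
      (by simp [PySem.Dict.keys_empty])
  have hkeys : (l.foldl (fun d i => d.modify i [] (· ++ [i])) PySem.Dict.empty).keys
      = PySem.Set.ofList l := by
    rw [PySem.Dict.keys_foldl_modify l [] (fun _ x => (· ++ [x])) PySem.Dict.empty]
    simp [PySem.Dict.keys_empty, PySem.Set.update_nil_left]
  have hgetD : ∀ c : String,
      (l.foldl (fun d i => d.modify i [] (· ++ [i])) PySem.Dict.empty).getD c []
        = List.replicate (l.count c) c := by
    intro c
    have hmap : l.foldl (fun d i => d.modify i [] (· ++ [i])) PySem.Dict.empty
        = (l.map (fun i => (i, i))).foldl (fun d p => d.modify p.1 [] (· ++ [p.2]))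
            PySem.Dict.empty := by
      rw [List.foldl_map]
    rw [hmap, PySem.Dict.getD_foldl_modify_append]
    simp [PySem.Dict.getD_empty, List.filter_map, Function.comp_def,
      List.filter_beq]
  rw [PySem.Dict.items_eq_map_keys _ hnd [], hkeys]
  exact List.map_congr_left (fun k _ => by rw [hgetD k])

theorem tao_dict_spec_aux (s : String) : tao_dict s = tao_dict_alt s := by
  unfold tao_dict tao_dict_alt
  rw [tao_fold_items, PySem.Dict.foldl_insert_getD_add_one_eq_counter]
  simp [PySem.Dict.items_counter, List.map_map, Function.comp_def]

-- ===== VERDICT (by name: the statement is the Claim_ definition above) =====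
theorem tao_dict_spec : Claim_equal_tao_dict := by
  intro s _
  exact tao_dict_spec_aux s
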